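-- pv_equiv track=rewrite | github.com/SamGarciaPereira/PUCPR | 1p/RaciocinioAlgoritmico/Python/testes/teste3.py | produto_maisvendido_mes
-- ===== SOURCE A (Python) =====
-- def produto_maisvendido_mes(vendas, mes):
--     qtd = 0
--     produto = ' '
--     for i in range(len(vendas)):
--         if vendas[i][3] == mes:
--             if vendas[i][1] > qtd:
--                 qtd = vendas [i][1]
--                 produto = vendas[i][0]
--     return produto
-- ===== SOURCE B (Python) =====
-- def produto_maisvendido_mes(vendas, mes):
--     ranked = sorted((v for v in vendas if v[3] == mes and v[1] > 0),
--                     key=lambda v: v[1], reverse=True)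
--     return ranked[0][0] if ranked else ' '
-- ===== Notes on version B (the rewrite author's own statement) =====
-- stated objective: alternative
-- what changed: Replaces A's single-pass accumulator loop by filtering the month's positive-quantity rows and stably sorting them by quantity in descending order, returning the head (stability reproduces A's first-wins tie behaviour); trades the O(n) scan for an O(n log n) sort.
import Mathlib
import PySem

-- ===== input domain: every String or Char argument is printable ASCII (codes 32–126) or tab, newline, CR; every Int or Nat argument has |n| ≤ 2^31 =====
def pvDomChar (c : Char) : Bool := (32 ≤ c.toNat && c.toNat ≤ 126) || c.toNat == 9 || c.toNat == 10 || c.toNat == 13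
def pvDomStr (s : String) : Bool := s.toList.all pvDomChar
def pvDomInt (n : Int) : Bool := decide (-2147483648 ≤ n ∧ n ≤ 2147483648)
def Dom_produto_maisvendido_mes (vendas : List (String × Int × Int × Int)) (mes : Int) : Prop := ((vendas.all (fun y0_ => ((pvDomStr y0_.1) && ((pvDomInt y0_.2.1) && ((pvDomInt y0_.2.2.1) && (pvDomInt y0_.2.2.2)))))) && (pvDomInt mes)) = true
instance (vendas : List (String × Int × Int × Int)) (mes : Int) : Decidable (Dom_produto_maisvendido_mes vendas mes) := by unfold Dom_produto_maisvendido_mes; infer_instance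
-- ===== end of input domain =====

-- B replaces A's single-pass accumulator loop by a filter of the month's positive-quantity
-- rows plus a stable descending sort by quantity, returning the head (objective: alternative).

-- ===== PORT A =====
-- A's loop state: (qtd, produto); one step of the for-loop body
def pmStepA (mes : Int) (st : Int × String) (v : String × Int × Int × Int) : Int × String :=
  if v.2.2.2 = mes then (if v.2.1 > st.1 then (v.2.1, v.1) else st) else st

def produto_maisvendido_mes (vendas : List (String × Int × Int × Int)) (mes : Int) : String :=
  (vendas.foldl (pmStepA mes) (0, " ")).2

-- ===== PORT B =====
-- the generator's filter
def pmPred (mes : Int) (v : String × Int × Int × Int) : Bool :=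
  v.2.2.2 == mes && decide (v.2.1 > 0)

def produto_maisvendido_mes_alt (vendas : List (String × Int × Int × Int)) (mes : Int) : String :=
  match PySem.List.sorted (vendas.filter (pmPred mes)) (fun v => v.2.1) true with
  | [] => " "
  | m :: _ => m.1

-- ===== PRECONDITION & SPEC =====
def Spec_produto_maisvendido_mes (vendas : List (String × Int × Int × Int)) (mes : Int) (out : String) : Prop := out = produto_maisvendido_mes_alt vendas mes
instance (vendas : List (String × Int × Int × Int)) (mes : Int) (out : String) : Decidable (Spec_produto_maisvendido_mes vendas mes out) := by unfold Spec_produto_maisvendido_mes; infer_instance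

-- ===== CLAIM (what is proved, stated in full; the proofs are below) =====
def Claim_equal_produto_maisvendido_mes : Prop := ∀ (vendas : List (String × Int × Int × Int)) (mes : Int), Dom_produto_maisvendido_mes vendas mes → Spec_produto_maisvendido_mes vendas mes (produto_maisvendido_mes vendas mes)

-- ===== LEMMAS AND PROOFS =====

-- first-wins max step (the element A's loop keeps when it sees v with best-so-far b)
def pmMaxStep (b v : String × Int × Int × Int) : String × Int × Int × Int :=
  if v.2.1 > b.2.1 then v else b

-- inserting x into a nonempty list with the reverse-sort comparator yields a list whose
-- head is the first-wins max of the old head and x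
theorem pm_insertBy_head (x h : String × Int × Int × Int) (t : List (String × Int × Int × Int)) :
    ∃ t', PySem.List.insertBy (fun a b => decide ((b.2.1 : Int) < a.2.1)) x (h :: t)
      = pmMaxStep h x :: t' := by
  by_cases hg : x.2.1 > h.2.1
  · exact ⟨h :: t, by simp [PySem.List.insertBy, pmMaxStep, hg]⟩
  · exact ⟨PySem.List.insertBy (fun a b => decide ((b.2.1 : Int) < a.2.1)) x t,
      by simp [PySem.List.insertBy, pmMaxStep, hg]⟩

-- the head of the insertion-sort fold over a nonempty accumulator is the first-wins max
theorem pm_head_foldl : ∀ (l : List (String × Int × Int × Int))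
    (h : String × Int × Int × Int) (t : List (String × Int × Int × Int)),
    ∃ t', l.foldl (fun acc x => PySem.List.insertBy (fun a b => decide ((b.2.1 : Int) < a.2.1)) x acc) (h :: t)
      = l.foldl pmMaxStep h :: t' := by
  intro l
  induction l with
  | nil => intro h t; exact ⟨t, rfl⟩
  | cons x xs ih =>
    intro h t
    obtain ⟨t', ht'⟩ := pm_insertBy_head x h t
    simpa [List.foldl, ht'] using ih (pmMaxStep h x) t'

-- head of the reverse stable sort of c :: cs is the first-wins max
theorem pm_sorted_head (c : String × Int × Int × Int) (cs : List (String × Int × Int × Int)) :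
    ∃ t', PySem.List.sorted (c :: cs) (fun v => v.2.1) true = cs.foldl pmMaxStep c :: t' := by
  rw [PySem.List.sorted_rev_eq_foldl_insertBy]
  simpa [List.foldl, PySem.List.insertBy] using pm_head_foldl cs c []

-- once the accumulator quantity is positive, A's remaining loop computes exactly the
-- first-wins max over the filtered remainder of the list
theorem pm_key (mes : Int) : ∀ (l : List (String × Int × Int × Int)) (c : String × Int × Int × Int),
    0 < c.2.1 →
    l.foldl (pmStepA mes) (c.2.1, c.1)
      = (((l.filter (pmPred mes)).foldl pmMaxStep c).2.1,
         ((l.filter (pmPred mes)).foldl pmMaxStep c).1) := by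
  intro l
  induction l with
  | nil => intro c hc; simp
  | cons v t ih =>
    intro c hc
    by_cases hm : v.2.2.2 = mes
    · by_cases hg : v.2.1 > c.2.1
      · have hp : pmPred mes v = true := by
          simp [pmPred, hm]; omega
        simp [List.foldl, hp, pmStepA, pmMaxStep, hm, hg]
        exact ih v (by omega)
      · by_cases hq : v.2.1 > 0
        · have hp : pmPred mes v = true := by simp [pmPred, hm, hq]
          simp [List.foldl, hp, pmStepA, pmMaxStep, hm, hg]
          exact ih c hc
        · have hp : pmPred mes v = false := by simp [pmPred, hq]
          simp [List.foldl, hp, pmStepA, hm, hg]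
          exact ih c hc
    · have hp : pmPred mes v = false := by simp [pmPred, hm]
      simp [List.foldl, hp, pmStepA, hm]
      exact ih c hc

theorem pm_main (mes : Int) : ∀ (l : List (String × Int × Int × Int)),
    (l.foldl (pmStepA mes) (0, " ")).2 = produto_maisvendido_mes_alt l mes := by
  intro l
  induction l with
  | nil => simp [produto_maisvendido_mes_alt, PySem.List.sorted]
  | cons v t ih =>
    by_cases hm : v.2.2.2 = mes
    · by_cases hq : v.2.1 > 0
      · have hp : pmPred mes v = true := by simp [pmPred, hm, hq]
        obtain ⟨t', ht'⟩ := pm_sorted_head v (t.filter (pmPred mes))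
        simp only [produto_maisvendido_mes_alt, List.filter_cons, hp, if_pos, List.foldl,
          pmStepA, hm, hq, ht']
        rw [pm_key mes t v hq]
      · have hp : pmPred mes v = false := by simp [pmPred, hq]
        simp only [produto_maisvendido_mes_alt, List.filter_cons, hp, List.foldl, pmStepA,
          hm, if_true]
        rw [if_neg hq]
        exact ih
    · have hp : pmPred mes v = false := by simp [pmPred, hm]
      simp only [produto_maisvendido_mes_alt, List.filter_cons, hp, List.foldl, pmStepA, hm,
        if_false]
      exact ih

-- ===== VERDICT (by name: the statement is the Claim_ definition above) =====
theorem produto_maisvendido_mes_spec : Claim_equal_produto_maisvendido_mes := by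
  intro vendas mes _
  unfold Spec_produto_maisvendido_mes produto_maisvendido_mes
  exact pm_main mes vendas
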